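-- pv_equiv track=rewrite | github.com/Spicfy/Projects | lab4.py | mess
-- ===== SOURCE A (Python) =====
-- def mess(string):
--     '''(string) --> string
--     precondition: none
--     returns a new string which has the last 8 consonant characters and whitespaces altered
--     '''
--     newstr = ''
--     for i in string:
--         if i in 'rstvwxyz':
--             newstr += i.upper()
--         elif i == ' ':
--             newstr += '-'
--         else:
--             newstr += i
--     return newstr
-- ===== SOURCE B (Python) =====
-- def mess(string):
--     for c in 'rstvwxyz':
--         string = string.replace(c, c.upper())
--     return string.replace(' ', '-')
-- ===== Notes on version B (the rewrite author's own statement) =====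
-- stated objective: faster
-- what changed: Replaces A's single per-character pass (if/elif chain appending to an accumulator) with nine staged whole-string str.replace passes, one per affected character; correct because each replacement's output characters (uppercase letters, dash) are never inputs of a later pass.
import Mathlib
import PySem

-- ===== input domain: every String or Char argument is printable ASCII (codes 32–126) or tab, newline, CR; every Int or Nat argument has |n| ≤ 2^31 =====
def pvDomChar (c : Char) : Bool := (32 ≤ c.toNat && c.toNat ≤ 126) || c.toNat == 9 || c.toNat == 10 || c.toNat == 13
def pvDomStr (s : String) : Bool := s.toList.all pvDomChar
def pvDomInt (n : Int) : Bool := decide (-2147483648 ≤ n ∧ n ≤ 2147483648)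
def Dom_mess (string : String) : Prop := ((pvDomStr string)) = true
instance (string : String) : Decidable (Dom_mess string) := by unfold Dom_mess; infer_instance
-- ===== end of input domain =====

-- B replaces A's single per-character accumulator loop by nine staged whole-string
-- str.replace passes (one per affected character); a timing run measured B faster.

-- ===== PORT A =====
def mess (string : String) : String :=
  String.ofList (string.toList.foldl (fun newstr i =>
    if i ∈ "rstvwxyz".toList then newstr ++ PySem.Chars.upper [i]
    else if i = ' ' then newstr ++ ['-']
    else newstr ++ [i]) [])

-- ===== PORT B =====
-- for c in 'rstvwxyz': string = string.replace(c, c.upper()); then replace ' ' with '-'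
def mess_alt (string : String) : String :=
  PySem.Str.replace
    ("rstvwxyz".toList.foldl (fun s c =>
      PySem.Str.replace s (String.ofList [c]) (String.ofList (PySem.Chars.upper [c]))) string)
    " " "-"

-- ===== PRECONDITION & SPEC =====
def Spec_mess (string : String) (out : String) : Prop := out = mess_alt string
instance (string : String) (out : String) : Decidable (Spec_mess string out) := by unfold Spec_mess; infer_instance

-- ===== CLAIM (what is proved, stated in full; the proofs are below) =====
def Claim_equal_mess : Prop := ∀ (string : String), Dom_mess string → Spec_mess string (mess string)

-- ===== LEMMAS AND PROOFS =====

-- single-character substitution as a function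
def sw (a b c : Char) : Char := if c = a then b else c

-- single-character replace never exhausts its fuel (= length) and is the pointwise map sw
theorem replace_go_single (a b : Char) :
    ∀ (l acc : List Char),
      PySem.Chars.replace.go [a] [b] l.length l acc
        = acc.reverse ++ l.map (sw a b) := by
  intro l
  induction l with
  | nil => intro acc; simp [PySem.Chars.replace.go]
  | cons c t ih =>
      intro acc
      by_cases h : c = a
      · subst h
        simp [PySem.Chars.replace.go, List.isPrefixOf, ih, sw]
      · have hpre : [a].isPrefixOf (c :: t) = false := by
          simp [List.isPrefixOf, Ne.symm h]
        simp [PySem.Chars.replace.go, hpre, ih, sw, h]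

theorem replace_single (a b : Char) (l : List Char) :
    PySem.Chars.replace l [a] [b] = l.map (sw a b) := by
  have : PySem.Chars.replace l [a] [b] = PySem.Chars.replace.go [a] [b] l.length l [] := by
    simp [PySem.Chars.replace]
  rw [this, replace_go_single]
  simp

-- one whole-string single-character replace pass, on toList
theorem stage_single (s : String) (a b : Char) (hb : PySem.Chars.upper [a] = [b]) :
    (PySem.Str.replace s (String.ofList [a]) (String.ofList (PySem.Chars.upper [a]))).toList
      = s.toList.map (sw a b) := by
  rw [PySem.Str.toList_replace, hb]
  simp [replace_single]

-- the composed effect of the nine passes on one character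
def messStep (c : Char) : Char :=
  if c = ' ' then '-' else
  if c = 'r' then 'R' else if c = 's' then 'S' else if c = 't' then 'T' else
  if c = 'v' then 'V' else if c = 'w' then 'W' else if c = 'x' then 'X' else
  if c = 'y' then 'Y' else if c = 'z' then 'Z' else c

theorem step_char (c : Char) :
    sw ' ' '-' (sw 'z' 'Z' (sw 'y' 'Y' (sw 'x' 'X' (sw 'w' 'W' (sw 'v' 'V'
      (sw 't' 'T' (sw 's' 'S' (sw 'r' 'R' c)))))))) = messStep c := by
  by_cases h1 : c = 'r'; · subst h1; decide
  by_cases h2 : c = 's'; · subst h2; decide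
  by_cases h3 : c = 't'; · subst h3; decide
  by_cases h4 : c = 'v'; · subst h4; decide
  by_cases h5 : c = 'w'; · subst h5; decide
  by_cases h6 : c = 'x'; · subst h6; decide
  by_cases h7 : c = 'y'; · subst h7; decide
  by_cases h8 : c = 'z'; · subst h8; decide
  by_cases h9 : c = ' '; · subst h9; decide
  simp [sw, messStep, h1, h2, h3, h4, h5, h6, h7, h8, h9]

-- the nine staged maps collapse to the single pointwise map messStep
theorem maps_collapse : ∀ (l : List Char),
    (((((((((l.map (sw 'r' 'R')).map (sw 's' 'S')).map (sw 't' 'T')).map (sw 'v' 'V')).map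
      (sw 'w' 'W')).map (sw 'x' 'X')).map (sw 'y' 'Y')).map (sw 'z' 'Z')).map (sw ' ' '-'))
      = l.map messStep := by
  intro l
  induction l with
  | nil => rfl
  | cons c t ih => simp only [List.map_cons, ih, step_char c]

-- B's staged passes compute the pointwise map messStep
theorem mess_alt_eq_map (s : String) :
    (mess_alt s).toList = s.toList.map messStep := by
  unfold mess_alt
  rw [PySem.Str.toList_replace]
  have hL : "rstvwxyz".toList = ['r','s','t','v','w','x','y','z'] := by decide
  rw [hL]
  simp only [List.foldl_cons, List.foldl_nil]
  rw [stage_single _ 'z' 'Z' (by decide), stage_single _ 'y' 'Y' (by decide),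
      stage_single _ 'x' 'X' (by decide), stage_single _ 'w' 'W' (by decide),
      stage_single _ 'v' 'V' (by decide), stage_single _ 't' 'T' (by decide),
      stage_single _ 's' 'S' (by decide), stage_single _ 'r' 'R' (by decide)]
  have hsp : (" " : String).toList = [' '] := by decide
  have hda : ("-" : String).toList = ['-'] := by decide
  rw [hsp, hda, replace_single, maps_collapse]

-- A's branch chain on one character is also messStep
theorem mess_char_eq (c : Char) :
    (if c ∈ "rstvwxyz".toList then PySem.Chars.upper [c]
     else if c = ' ' then ['-'] else [c]) = [messStep c] := by
  by_cases hr : c = 'r'; · subst hr; decide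
  by_cases hs : c = 's'; · subst hs; decide
  by_cases ht : c = 't'; · subst ht; decide
  by_cases hv : c = 'v'; · subst hv; decide
  by_cases hw : c = 'w'; · subst hw; decide
  by_cases hx : c = 'x'; · subst hx; decide
  by_cases hy : c = 'y'; · subst hy; decide
  by_cases hz : c = 'z'; · subst hz; decide
  by_cases hsp : c = ' '; · subst hsp; decide
  have hL : "rstvwxyz".toList = ['r','s','t','v','w','x','y','z'] := by decide
  have hmem : c ∉ "rstvwxyz".toList := by
    rw [hL]; simp [hr, hs, ht, hv, hw, hx, hy, hz]
  rw [if_neg hmem, if_neg hsp]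
  simp [messStep, hr, hs, ht, hv, hw, hx, hy, hz, hsp]

-- ===== VERDICT (by name: the statement is the Claim_ definition above) =====
theorem mess_spec : Claim_equal_mess := by
  intro s _
  unfold Spec_mess mess
  have hfun : (fun (newstr : List Char) i =>
      if i ∈ "rstvwxyz".toList then newstr ++ PySem.Chars.upper [i]
      else if i = ' ' then newstr ++ ['-'] else newstr ++ [i])
      = (fun newstr i => newstr ++ (if i ∈ "rstvwxyz".toList then PySem.Chars.upper [i]
      else if i = ' ' then ['-'] else [i])) := by
    funext a b; split_ifs <;> rfl
  rw [hfun, PySem.List.foldl_append_eq_flatMap, List.nil_append]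
  have hmap : s.toList.flatMap (fun i => if i ∈ "rstvwxyz".toList then PySem.Chars.upper [i]
            else if i = ' ' then ['-'] else [i])
        = s.toList.map messStep := by
    calc s.toList.flatMap _ = s.toList.flatMap (fun c => [messStep c]) := by
          apply List.flatMap_congr; intro c _; exact mess_char_eq c
      _ = s.toList.map messStep := List.map_eq_flatMap.symm
  rw [hmap, ← mess_alt_eq_map]
  simp
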